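-- pv_equiv track=rewrite | github.com/offero/algs | dcp620_brick_cut.py | min_bricks
-- ===== SOURCE A (Python) =====
-- def min_bricks(bricks):
--     wall_length = sum(bricks[0])
--     edge_counts = [0] * (wall_length+1)
--     max_shared_edge_ct = 0
--     for row in bricks:
--         running_sum = 0
--         for val in row:
--             running_sum += val
--             edge_counts[running_sum] += 1
--             if edge_counts[running_sum] > max_shared_edge_ct \
--                     and running_sum != wall_length:
--                 max_shared_edge_ct = edge_counts[running_sum]
--     num_rows = len(bricks)
--     return num_rows - max_shared_edge_ct
-- ===== SOURCE B (Python) =====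
-- def min_bricks(bricks):
--     wall_length = sum(bricks[0])
--
--     def prefixes(row):
--         s = 0
--         for v in row:
--             s += v
--             yield s
--
--     edges = sorted(p for row in bricks for p in prefixes(row) if p != wall_length)
--     run = 0
--     prev = None
--     best = 0
--     for e in edges:
--         run = run + 1 if prev == e else 1
--         prev = e
--         if run > best:
--             best = run
--     return len(bricks) - best
-- ===== Notes on version B (the rewrite author's own statement) =====
-- stated objective: alternative
-- what changed: Replaces A's preallocated counting array with running max by sort-then-scan: collect every interior prefix-sum edge position, sort the list, and find the most-shared edge as the longest run of equal values in one linear scan.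
-- intended difference: On walls where two distinct running sums wall_length+1 apart both occur (the later not at the wall end), A's edge_counts[running_sum] wraps the negative index and merges two different edge positions into one array slot, returning that merged (too large) share count subtracted from the row count, e.g. -1 on [[-1,3],[-1,3]]; B counts each running-sum position separately and returns 0 there, the intended count of bricks cut. — e.g. on min_bricks([[-1, 3], [-1, 3]]): A returns -1, B returns 0
import Mathlib
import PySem

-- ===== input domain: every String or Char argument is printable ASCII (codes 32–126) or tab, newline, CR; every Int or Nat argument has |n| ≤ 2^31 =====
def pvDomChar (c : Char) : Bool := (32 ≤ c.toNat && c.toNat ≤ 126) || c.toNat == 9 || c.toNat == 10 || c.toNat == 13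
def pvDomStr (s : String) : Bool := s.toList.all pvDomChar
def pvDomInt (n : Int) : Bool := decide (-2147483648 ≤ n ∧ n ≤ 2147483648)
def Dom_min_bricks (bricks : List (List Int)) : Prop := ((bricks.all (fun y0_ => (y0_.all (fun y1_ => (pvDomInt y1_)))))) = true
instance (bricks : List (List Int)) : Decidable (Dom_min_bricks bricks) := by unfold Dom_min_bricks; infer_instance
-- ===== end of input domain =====

-- B replaces A's preallocated count array + inline running max by sort-then-scan:
-- collect all interior edge positions, sort them, and take the longest run of equal
-- values in one linear pass (objective: alternative).

-- ===== PORT A =====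
-- inner loop body of A: running_sum += val; edge_counts[running_sum] += 1; possibly bump the max
def pvInnerA (wl : Int) (s : Int × List Int × Int) (val : Int) : Int × List Int × Int :=
  let rs := s.1 + val
  let ec := PySem.List.pySetD s.2.1 rs (PySem.List.pyGetD s.2.1 rs 0 + 1)
  if PySem.List.pyGetD ec rs 0 > s.2.2 ∧ rs ≠ wl then (rs, ec, PySem.List.pyGetD ec rs 0)
  else (rs, ec, s.2.2)

def min_bricks (bricks : List (List Int)) : Int :=
  let wall_length : Int := ((PySem.List.pyGet? bricks 0).getD []).sum
  let st := bricks.foldl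
    (fun (st : List Int × Int) row => (row.foldl (pvInnerA wall_length) ((0 : Int), st.1, st.2)).2)
    (List.replicate (wall_length + 1).toNat (0 : Int), 0)
  PySem.List.len bricks - st.2

-- ===== PORT B =====
-- B's helper `prefixes(row)`: the running prefix sums of a row, starting from s
def pvPrefixes (s : Int) : List Int → List Int
  | [] => []
  | v :: r => (s + v) :: pvPrefixes (s + v) r

-- B's scan body over the sorted edge list: state (run, prev, best)
def pvScanStep (st : Int × Option Int × Int) (e : Int) : Int × Option Int × Int :=
  let run := if st.2.1 = some e then st.1 + 1 else 1
  (run, some e, if run > st.2.2 then run else st.2.2)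

def min_bricks_alt (bricks : List (List Int)) : Int :=
  let wall_length : Int := ((PySem.List.pyGet? bricks 0).getD []).sum
  let edges := PySem.List.sorted
    ((bricks.flatMap (pvPrefixes 0)).filter (fun p => decide (p ≠ wall_length)))
    (fun x => x) false
  let st := edges.foldl pvScanStep ((0 : Int), none, (0 : Int))
  PySem.List.len bricks - st.2.2

-- ===== PRECONDITION & SPEC =====
/-- All running sums of the wall, row by row (each row restarting from 0), in program order. -/
def pvSums (bricks : List (List Int)) : List Int :=
  bricks.flatMap (fun row => (row.scanl (· + ·) 0).tail)

-- Pre_ is exactly the inputs on which A returns: a nonempty wall whose running sums all lie in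
-- [-(wall_length+1), wall_length] (outside that range A's edge_counts[running_sum] raises
-- IndexError, and on an empty wall so does bricks[0]).
def Pre_min_bricks (bricks : List (List Int)) : Prop :=
  bricks ≠ [] ∧ ∀ e ∈ pvSums bricks,
    -((bricks.headI).sum + 1) ≤ e ∧ e ≤ (bricks.headI).sum
instance (bricks : List (List Int)) : Decidable (Pre_min_bricks bricks) := by
  unfold Pre_min_bricks; infer_instance

def pvWitness_min_bricks : List (List Int) := [[1, 2], [2, 1], [3]]

-- On walls where two distinct running sums wall_length+1 apart occur (the later of the pair not
-- equal to wall_length), A returns a count based on Python's negative-index wraparound merging the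
-- two edge positions into one array slot (so A can report fewer intact bricks than the positions
-- warrant), while B counts each running-sum value separately — the intended reading of
-- "bricks sharing an edge position".
/-- A later-read slot collision: a negative running sum whose wraparound partner (wall_length+1
away) also occurs — before it, or after it away from the wall end. -/
abbrev pvColl (W : Int) (S : List Int) : Prop :=
  ∃ p ∈ S.zipIdx, p.1 < 0 ∧ p.1 + W + 1 ∈ S.take p.2 ++ (S.drop p.2).filter (· ≠ W)

def D_min_bricks (bricks : List (List Int)) : Prop :=
  pvColl (bricks.headI).sum (pvSums bricks)
instance (bricks : List (List Int)) : Decidable (D_min_bricks bricks) := by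
  unfold D_min_bricks; infer_instance

def Spec_min_bricks (bricks : List (List Int)) (out : Int) : Prop :=
  ¬ D_min_bricks bricks → out = min_bricks_alt bricks
instance (bricks : List (List Int)) (out : Int) : Decidable (Spec_min_bricks bricks out) := by
  unfold Spec_min_bricks; infer_instance

def pvDiffWitness_min_bricks : List (List Int) := [[-1, 3], [-1, 3]]
def pvDiffWitnessOut_min_bricks : Int × Int := (-1, 0)

-- ===== CLAIM (what is proved, stated in full; the proofs are below) =====
def Claim_unchanged_min_bricks : Prop := ∀ (bricks : List (List Int)), Dom_min_bricks bricks → Pre_min_bricks bricks → Spec_min_bricks bricks (min_bricks bricks)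
def Claim_changed_min_bricks : Prop := Dom_min_bricks (pvDiffWitness_min_bricks) ∧ Pre_min_bricks (pvDiffWitness_min_bricks) ∧ D_min_bricks (pvDiffWitness_min_bricks) ∧ min_bricks (pvDiffWitness_min_bricks) = pvDiffWitnessOut_min_bricks.1 ∧ min_bricks_alt (pvDiffWitness_min_bricks) = pvDiffWitnessOut_min_bricks.2 ∧ pvDiffWitnessOut_min_bricks.1 ≠ pvDiffWitnessOut_min_bricks.2

-- ===== LEMMAS AND PROOFS =====

theorem pv_scanl_head (l : List Int) (b : Int) :
    List.scanl (· + ·) b l = b :: (List.scanl (· + ·) b l).tail := by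
  cases l <;> simp [List.scanl]

theorem pvPrefixes_eq_scanl : ∀ (row : List Int) (s : Int),
    pvPrefixes s row = (row.scanl (· + ·) s).tail := by
  intro row
  induction row with
  | nil => intro s; simp [pvPrefixes]
  | cons v r ih =>
      intro s
      rw [List.scanl_cons, List.tail_cons, pv_scanl_head r (s + v)]
      simp [pvPrefixes, ih]

theorem pvSums_eq (bricks : List (List Int)) :
    pvSums bricks = bricks.flatMap (pvPrefixes 0) := by
  unfold pvSums
  congr 1
  funext row
  rw [pvPrefixes_eq_scanl]

/-- A's per-edge state transition on (edge_counts, max_shared_edge_ct). -/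
def pvStepA (wl : Int) (st : List Int × Int) (rs : Int) : List Int × Int :=
  let ec := PySem.List.pySetD st.1 rs (PySem.List.pyGetD st.1 rs 0 + 1)
  if PySem.List.pyGetD ec rs 0 > st.2 ∧ rs ≠ wl then (ec, PySem.List.pyGetD ec rs 0)
  else (ec, st.2)

/-- The common specification value: max multiplicity in a list of edge positions. -/
def pvMaxCount (L : List Int) : Int :=
  ((PySem.Set.ofList L).map (fun k => (L.count k : Int))).foldl max 0

/-- Max multiplicity among interior edge positions of E. -/
def pvMS (wl : Int) (E : List Int) : Int :=
  pvMaxCount (E.filter (fun e => decide (e ≠ wl)))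

theorem pvInnerA_eq (wl s : Int) (ec : List Int) (m v : Int) :
    pvInnerA wl (s, ec, m) v = (s + v, pvStepA wl (ec, m) (s + v)) := by
  simp only [pvInnerA, pvStepA]; split_ifs <;> rfl

theorem pvRowA (wl : Int) : ∀ (row : List Int) (s : Int) (st : List Int × Int),
    row.foldl (pvInnerA wl) (s, st.1, st.2) = (s + row.sum, (pvPrefixes s row).foldl (pvStepA wl) st) := by
  intro row
  induction row with
  | nil => intro s st; simp [pvPrefixes]
  | cons v r ih =>
      intro s st
      simp only [List.foldl_cons, pvInnerA_eq, pvPrefixes]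
      rw [show pvStepA wl (st.1, st.2) (s + v) = pvStepA wl st (s + v) by rfl]
      rw [show (s + v, pvStepA wl st (s + v)) =
            (s + v, (pvStepA wl st (s + v)).1, (pvStepA wl st (s + v)).2) by rfl]
      rw [ih (s + v) (pvStepA wl st (s + v))]
      simp [List.sum_cons]
      ring

theorem pvOuterA (wl : Int) : ∀ (rows : List (List Int)) (st : List Int × Int),
    rows.foldl (fun (st : List Int × Int) row => (row.foldl (pvInnerA wl) ((0 : Int), st.1, st.2)).2) st
      = (rows.flatMap (pvPrefixes 0)).foldl (pvStepA wl) st := by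
  intro rows
  induction rows with
  | nil => intro st; simp
  | cons row rest ih =>
      intro st
      simp only [List.foldl_cons, List.flatMap_cons, List.foldl_append]
      rw [pvRowA wl row 0 st]
      exact ih _

theorem pv_foldl_max_mono : ∀ (r : List Int) (a b : Int), a ≤ b →
    r.foldl max a ≤ r.foldl max b := by
  intro r
  induction r with
  | nil => intro a b h; simpa using h
  | cons x t ih => intro a b h; simp only [List.foldl_cons]; exact ih _ _ (by omega)

theorem pv_foldl_max_shift (r : List Int) (a b : Int) (hab : a ≤ b) :
    r.foldl max b = max (r.foldl max a) b := by
  apply le_antisymm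
  · rcases PySem.List.foldl_max_mem r b with h | h
    · omega
    · have := (PySem.List.le_foldl_max r a).2 _ h
      omega
  · have h1 := pv_foldl_max_mono r a b hab
    have h2 := (PySem.List.le_foldl_max r b).1
    omega

theorem pv_foldl_max_replace (A B : List Int) (c : Int) :
    ((A ++ (c + 1) :: B).foldl max 0) = max ((A ++ c :: B).foldl max 0) (c + 1) := by
  simp only [List.foldl_append, List.foldl_cons]
  have ha : (0 : Int) ≤ A.foldl max 0 := (PySem.List.le_foldl_max A 0).1
  rw [pv_foldl_max_shift B (max (A.foldl max 0) c) (max (A.foldl max 0) (c + 1)) (by omega)]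
  have hF := (PySem.List.le_foldl_max B (max (A.foldl max 0) c)).1
  omega

theorem pvMaxCount_append (E' : List Int) (rs : Int) :
    pvMaxCount (E' ++ [rs]) = max (pvMaxCount E') ((E'.count rs : Int) + 1) := by
  unfold pvMaxCount
  have hone : ∀ k : Int, k ≠ rs → List.count k [rs] = 0 := by
    intro k h
    exact List.count_eq_zero.mpr (by simp [h])
  have hcnt : ∀ k : Int, ((E' ++ [rs]).count k : Int)
      = (E'.count k : Int) + if k = rs then 1 else 0 := by
    intro k
    rw [List.count_append]
    push_cast
    congr 1
    by_cases h : k = rs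
    · subst h; simp
    · simp [hone k h, h]
  rw [PySem.Set.ofList_append_singleton]
  by_cases hmem : rs ∈ E'
  · rw [PySem.Set.add_of_mem (by simpa [PySem.Set.mem_ofList] using hmem)]
    have hmem' : rs ∈ PySem.Set.ofList E' := by simpa [PySem.Set.mem_ofList] using hmem
    obtain ⟨l1, l2, hs⟩ := List.append_of_mem hmem'
    have hnd : (PySem.Set.ofList E').Nodup := PySem.Set.nodup_ofList E'
    rw [hs] at hnd
    rw [List.nodup_append] at hnd
    obtain ⟨-, hnd2, hdisj⟩ := hnd
    have hrs2 : rs ∉ l2 := (List.nodup_cons.mp hnd2).1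
    have hrs1 : rs ∉ l1 := fun h => hdisj rs h rs (by simp) rfl
    have hl1 : l1.map (fun k => ((E' ++ [rs]).count k : Int))
        = l1.map (fun k => (E'.count k : Int)) := by
      apply List.map_congr_left
      intro k hk
      have hne : k ≠ rs := fun h => hrs1 (h ▸ hk)
      rw [hcnt k, if_neg hne, add_zero]
    have hl2 : l2.map (fun k => ((E' ++ [rs]).count k : Int))
        = l2.map (fun k => (E'.count k : Int)) := by
      apply List.map_congr_left
      intro k hk
      have hne : k ≠ rs := fun h => hrs2 (h ▸ hk)
      rw [hcnt k, if_neg hne, add_zero]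
    rw [hs, List.map_append, List.map_cons, List.map_append, List.map_cons, hl1, hl2]
    rw [show ((E' ++ [rs]).count rs : Int) = (E'.count rs : Int) + 1 by rw [hcnt rs]; simp]
    exact pv_foldl_max_replace _ _ _
  · rw [PySem.Set.add_of_not_mem (by simpa [PySem.Set.mem_ofList] using hmem)]
    have hc0 : E'.count rs = 0 := List.count_eq_zero.mpr hmem
    rw [List.map_append, List.map_singleton, List.foldl_append]
    rw [List.map_congr_left (f := fun k => ((E' ++ [rs]).count k : Int))
        (g := fun k => (E'.count k : Int))
        (by intro k hk
            have hne : k ≠ rs := by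
              intro h; subst h; exact hmem (by simpa [PySem.Set.mem_ofList] using hk)
            show ((E' ++ [rs]).count k : Int) = (E'.count k : Int)
            rw [hcnt k, if_neg hne, add_zero])]
    simp only [List.foldl_cons]
    have := (PySem.List.le_foldl_max ((PySem.Set.ofList E').map (fun k => (E'.count k : Int))) 0).1
    rw [hcnt rs]
    simp [hc0]

theorem pvCount_append (E : List Int) (rs k : Int) :
    ((E ++ [rs]).count k : Int) = (E.count k : Int) + if k = rs then 1 else 0 := by
  rw [List.count_append]
  push_cast
  congr 1
  by_cases h : k = rs
  · subst h; simp
  · simp [List.count_eq_zero.mpr (show k ∉ [rs] by simp [h]), h]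

def pvSlotNat (n : Nat) (i : Int) : Nat := if i < 0 then n - (-i).toNat else i.toNat

theorem pv_pySetD_slot (xs : List Int) (i v : Int) (h1 : -(xs.length : Int) ≤ i)
    (_h2 : i < (xs.length : Int)) :
    PySem.List.pySetD xs i v = xs.set (pvSlotNat xs.length i) v := by
  by_cases h : 0 ≤ i
  · rw [PySem.List.pySetD_of_nonneg _ _ h]
    simp [pvSlotNat, not_lt.mpr h]
  · simp only [PySem.List.pySetD, PySem.List.pySet?, PySem.List.pyIdx?, if_neg h,
      if_pos h1, Option.map_some, Option.getD_some, pvSlotNat, if_pos (by omega : i < 0)]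

theorem pv_pyGetD_slot (xs : List Int) (i d : Int) (h1 : -(xs.length : Int) ≤ i)
    (h2 : i < (xs.length : Int)) :
    PySem.List.pyGetD xs i d = xs.getD (pvSlotNat xs.length i) d := by
  by_cases h : 0 ≤ i
  · rw [PySem.List.pyGetD_eq_getElem _ _ h h2]
    simp only [pvSlotNat, if_neg (not_lt.mpr h)]
    rw [List.getD_eq_getElem _ _ (by omega)]
  · have hk : i = -(((-i).toNat : Nat) : Int) := by omega
    have h3 := PySem.List.pyGetD_neg_natCast xs (-i).toNat d (by omega) (by omega)
    rw [← hk] at h3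
    rw [h3]
    simp only [pvSlotNat, if_pos (by omega : i < 0)]
    rw [List.getD_eq_getElem _ _ (by omega)]

theorem pvMainA (wl : Int) (hwl : 0 ≤ wl) : ∀ (E : List Int),
    (∀ e ∈ E, -(wl + 1) ≤ e ∧ e ≤ wl) →
    E.Pairwise (fun a b => b = wl ∨ (a - b ≠ wl + 1 ∧ b - a ≠ wl + 1)) →
    (E.foldl (pvStepA wl) (List.replicate (wl + 1).toNat (0 : Int), 0)).1.length = (wl + 1).toNat ∧
    (∀ s : Nat, s < (wl + 1).toNat →
      (E.foldl (pvStepA wl) (List.replicate (wl + 1).toNat (0 : Int), 0)).1.getD s 0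
        = (E.count (s : Int) : Int) + (E.count ((s : Int) - (wl + 1)) : Int)) ∧
    (E.foldl (pvStepA wl) (List.replicate (wl + 1).toNat (0 : Int), 0)).2 = pvMS wl E := by
  intro E
  induction E using List.reverseRecOn with
  | nil =>
      intro _ _
      refine ⟨by simp, ?_, by simp [pvMS, pvMaxCount]⟩
      intro p hp
      rw [List.getD_eq_getElem _ _ (by simpa using hp)]
      simp
  | append_singleton E rs ih =>
      intro hE hP
      have hEk : ∀ e ∈ E, -(wl + 1) ≤ e ∧ e ≤ wl := fun e he => hE e (by simp [he])
      rw [List.pairwise_append] at hP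
      obtain ⟨hPE, -, hPcross⟩ := hP
      have hcross : ∀ e ∈ E, rs = wl ∨ (e - rs ≠ wl + 1 ∧ rs - e ≠ wl + 1) :=
        fun e he => hPcross e he rs (by simp)
      obtain ⟨ih1, ih2, ih3⟩ := ih hEk hPE
      have hrs : -(wl + 1) ≤ rs ∧ rs ≤ wl := hE rs (by simp)
      rw [List.foldl_concat]
      set st := E.foldl (pvStepA wl) (List.replicate (wl + 1).toNat (0 : Int), 0) with hst
      have hlen : (st.1.length : Int) = wl + 1 := by rw [ih1]; omega
      have hlb : -(st.1.length : Int) ≤ rs := by omega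
      have hub : rs < (st.1.length : Int) := by omega
      set s0 : Nat := pvSlotNat st.1.length rs with hs0
      have hs0lt : s0 < (wl + 1).toNat := by
        simp only [hs0, pvSlotNat]
        split_ifs <;> omega
      have hs0len : s0 < st.1.length := by omega
      -- the two keys sharing slot s0, and the old slot value
      have hkeys : ((s0 : Int) = rs ∧ 0 ≤ rs) ∨ ((s0 : Int) - (wl + 1) = rs ∧ rs < 0) := by
        simp only [hs0, pvSlotNat]
        split_ifs with h <;> [right; left] <;> constructor <;> omega
      have hold : PySem.List.pyGetD st.1 rs 0
          = (E.count (s0 : Int) : Int) + (E.count ((s0 : Int) - (wl + 1)) : Int) := by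
        rw [pv_pyGetD_slot _ _ _ hlb hub]
        exact ih2 s0 hs0lt
      have hsetd : PySem.List.pySetD st.1 rs (PySem.List.pyGetD st.1 rs 0 + 1)
          = st.1.set s0 ((E.count (s0 : Int) : Int) + (E.count ((s0 : Int) - (wl + 1)) : Int) + 1) := by
        rw [pv_pySetD_slot _ _ _ hlb hub, hold]
      -- the value A reads back after the increment
      have hget' : PySem.List.pyGetD
          (st.1.set s0 ((E.count (s0 : Int) : Int) + (E.count ((s0 : Int) - (wl + 1)) : Int) + 1)) rs 0
          = (E.count (s0 : Int) : Int) + (E.count ((s0 : Int) - (wl + 1)) : Int) + 1 := by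
        rw [pv_pyGetD_slot _ _ _ (by simpa using hlb) (by simpa using hub)]
        have hsl : ∀ w : Int, pvSlotNat (st.1.set s0 w).length rs = s0 := by
          intro w; rw [List.length_set]
        rw [hsl, List.getD_eq_getElem _ _ (by simpa using hs0len), List.getElem_set, if_pos rfl]
      -- when the arriving edge is read for the max, the partner key is absent
      have hread : rs ≠ wl →
          (E.count (s0 : Int) : Int) + (E.count ((s0 : Int) - (wl + 1)) : Int) + 1
            = (E.count rs : Int) + 1 := by
        intro hne
        rcases hkeys with ⟨hk, hnn⟩ | ⟨hk, hneg⟩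
        · have : E.count ((s0 : Int) - (wl + 1)) = 0 := by
            rw [List.count_eq_zero]
            intro hmem
            rcases hcross _ hmem with h | ⟨-, h2⟩
            · exact hne h
            · omega
          rw [hk] at *
          omega
        · have : E.count (s0 : Int) = 0 := by
            rw [List.count_eq_zero]
            intro hmem
            rcases hcross _ hmem with h | ⟨h1, -⟩
            · exact hne h
            · omega
          rw [hk] at *
          omega
      refine ⟨?_, ?_, ?_⟩
      · simp only [pvStepA, hsetd]
        split_ifs <;> simp [List.length_set, ih1]
      · intro p hp
        have hcore : (st.1.set s0 ((E.count (s0 : Int) : Int) + (E.count ((s0 : Int) - (wl + 1)) : Int) + 1)).getD p 0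
            = ((E ++ [rs]).count (p : Int) : Int) + ((E ++ [rs]).count ((p : Int) - (wl + 1)) : Int) := by
          rw [List.getD_eq_getElem _ _ (by simp; omega), List.getElem_set,
            pvCount_append, pvCount_append]
          by_cases hps : s0 = p
          · subst hps
            rw [if_pos rfl]
            rcases hkeys with ⟨hk, hnn⟩ | ⟨hk, hneg⟩
            · rw [if_pos hk, if_neg (by omega : ¬ ((s0 : Int) - (wl + 1) = rs))]
              omega
            · rw [if_neg (by omega : ¬ ((s0 : Int) = rs)), if_pos hk]
              omega
          · rw [if_neg hps]
            have hne1 : ¬ ((p : Int) = rs) := by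
              rcases hkeys with ⟨hk, -⟩ | ⟨-, hneg⟩ <;> omega
            have hne2 : ¬ ((p : Int) - (wl + 1) = rs) := by
              rcases hkeys with ⟨-, hnn⟩ | ⟨hk, -⟩ <;> omega
            rw [if_neg hne1, if_neg hne2, add_zero, add_zero,
              ← List.getD_eq_getElem _ _ (by omega)]
            exact ih2 p hp
        simp only [pvStepA, hsetd]
        split_ifs <;> exact hcore
      · simp only [pvStepA, hsetd, hget']
        by_cases hwall : rs = wl
        · rw [if_neg (by simp [hwall])]
          have : (E ++ [rs]).filter (fun e => decide (e ≠ wl)) = E.filter (fun e => decide (e ≠ wl)) := by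
            subst hwall; simp [List.filter_append]
          simp only [pvMS, this]
          exact ih3
        · have hfilt : (E ++ [rs]).filter (fun e => decide (e ≠ wl))
              = E.filter (fun e => decide (e ≠ wl)) ++ [rs] := by
            simp [List.filter_append, hwall]
          have hcf : (E.filter (fun e => decide (e ≠ wl))).count rs = E.count rs :=
            List.count_filter (by simp [hwall])
          have hMS := pvMaxCount_append (E.filter (fun e => decide (e ≠ wl))) rs
          simp only [pvMS, hfilt]
          rw [hMS, hcf, ih3]
          have hle := (PySem.List.le_foldl_max
            ((PySem.Set.ofList (E.filter (fun e => decide (e ≠ wl)))).map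
              (fun k => ((E.filter (fun e => decide (e ≠ wl))).count k : Int))) 0).1
          simp only [pvMS, pvMaxCount]
          rw [hread hwall]
          split_ifs with h
          · rw [max_eq_right (by omega)]
          · rw [max_eq_left (by omega)]

-- ===== B-side lemmas: the sorted run-length scan computes the max multiplicity =====

theorem pv_foldl_max_perm (S T : List Int) (h : S.Perm T) : ∀ a : Int,
    S.foldl max a = T.foldl max a := by
  induction h with
  | nil => intro a; rfl
  | cons x _ ih => intro a; simp only [List.foldl_cons]; exact ih _
  | swap x y l => intro a; simp only [List.foldl_cons]; rw [max_right_comm]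
  | trans _ _ ih1 ih2 => intro a; rw [ih1 a, ih2 a]

theorem pvMaxCount_perm (S T : List Int) (h : S.Perm T) : pvMaxCount S = pvMaxCount T := by
  unfold pvMaxCount
  have hc : (fun k => ((S.count k : Nat) : Int)) = (fun k => ((T.count k : Nat) : Int)) := by
    funext k
    rw [h.count_eq]
  rw [hc]
  have hperm : (PySem.Set.ofList S).Perm (PySem.Set.ofList T) := by
    rw [List.perm_ext_iff_of_nodup (PySem.Set.nodup_ofList S) (PySem.Set.nodup_ofList T)]
    intro a
    rw [PySem.Set.mem_ofList, PySem.Set.mem_ofList]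
    exact h.mem_iff
  exact pv_foldl_max_perm _ _ (hperm.map _) 0

theorem pv_sorted_le_getLast : ∀ (L : List Int), L.Pairwise (· ≤ ·) →
    ∀ l, L.getLast? = some l → ∀ x ∈ L, x ≤ l := by
  intro L
  induction L with
  | nil => simp
  | cons a t ih =>
      intro hp l hl x hx
      obtain ⟨ha, hpt⟩ := List.pairwise_cons.mp hp
      cases t with
      | nil =>
          simp at hl hx
          omega
      | cons b t' =>
          rw [List.getLast?_cons_cons] at hl
          rcases List.mem_cons.mp hx with rfl | hx'
          · have hlm : l ∈ b :: t' := List.mem_of_getLast? hl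
            exact ha l hlm
          · exact ih hpt l hl x hx'

theorem pvScan_main : ∀ (L : List Int), L.Pairwise (· ≤ ·) →
    (L.foldl pvScanStep ((0 : Int), none, (0 : Int))).2.2 = pvMaxCount L ∧
    (∀ l, L.getLast? = some l →
      (L.foldl pvScanStep ((0 : Int), none, (0 : Int))).2.1 = some l ∧
      (L.foldl pvScanStep ((0 : Int), none, (0 : Int))).1 = (L.count l : Int)) := by
  intro L
  induction L using List.reverseRecOn with
  | nil =>
      intro _
      exact ⟨by simp [pvMaxCount], by simp⟩
  | append_singleton L e ih =>
      intro hp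
      rw [List.pairwise_append] at hp
      obtain ⟨hpL, -, hcross⟩ := hp
      have hle : ∀ x ∈ L, x ≤ e := fun x hx => hcross x hx e (by simp)
      obtain ⟨ihb, ihl⟩ := ih hpL
      rw [List.foldl_concat]
      have hlast : (L ++ [e]).getLast? = some e := by
        rw [List.getLast?_concat]
      cases hL : L with
      | nil =>
          subst hL
          refine ⟨?_, ?_⟩
          · show (if (1 : Int) > 0 then (1 : Int) else 0) = pvMaxCount [e]
            have : pvMaxCount [e] = 1 := by
              unfold pvMaxCount
              rw [show PySem.Set.ofList [e] = [e] from rfl]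
              simp
            rw [this]
            norm_num
          · intro l hl
            rw [List.nil_append, List.getLast?_singleton] at hl
            obtain rfl := Option.some.inj hl
            constructor
            · rfl
            · show (if (none : Option Int) = some e then (0:Int) + 1 else 1) = _
              simp
      | cons a t =>
          rw [← hL]
          have hLne : L ≠ [] := by rw [hL]; simp
          obtain ⟨l0, hl0⟩ := Option.isSome_iff_exists.mp (List.getLast?_isSome.mpr hLne)
          obtain ⟨ihp, ihr⟩ := ihl l0 hl0
          set st := L.foldl pvScanStep ((0 : Int), none, (0 : Int)) with hstdef
          have hl0e : l0 ≤ e := hle l0 (List.mem_of_getLast? hl0)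
          by_cases heq : e = l0
          · -- last element repeats: run grows by one
            subst heq
            have hcnt : ((L ++ [e]).count e : Int) = (L.count e : Int) + 1 := by
              rw [pvCount_append, if_pos rfl]
            have hstep : pvScanStep st e
                = ((L.count e : Int) + 1, some e,
                   if (L.count e : Int) + 1 > st.2.2 then (L.count e : Int) + 1 else st.2.2) := by
              simp only [pvScanStep, ihp, ihr]
              simp
            rw [hstep]
            refine ⟨?_, ?_⟩
            · show (if (L.count e : Int) + 1 > st.2.2 then (L.count e : Int) + 1 else st.2.2)
                = pvMaxCount (L ++ [e])
              rw [pvMaxCount_append, ihb]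
              split_ifs with h
              · rw [max_eq_right (by omega)]
              · rw [max_eq_left (by omega)]
            · intro l hl
              rw [hlast] at hl
              obtain rfl := Option.some.inj hl
              exact ⟨rfl, by rw [hcnt]⟩
          · -- strictly larger new element: fresh run of length 1
            have hnot : e ∉ L := by
              intro hmem
              have h1 : e ≤ l0 := pv_sorted_le_getLast L hpL l0 hl0 e hmem
              exact heq (le_antisymm h1 hl0e)
            have hc0 : L.count e = 0 := List.count_eq_zero.mpr hnot
            have hstep : pvScanStep st e
                = (1, some e, if (1 : Int) > st.2.2 then 1 else st.2.2) := by
              simp only [pvScanStep, ihp]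
              rw [if_neg (by simpa using fun h => heq h.symm)]
            rw [hstep]
            refine ⟨?_, ?_⟩
            · show (if (1 : Int) > st.2.2 then (1 : Int) else st.2.2) = pvMaxCount (L ++ [e])
              rw [pvMaxCount_append, ihb]
              rw [show ((L.count e : Nat) : Int) = 0 by rw [hc0]; rfl]
              split_ifs with h
              · rw [max_eq_right (by omega)]
                norm_num
              · rw [max_eq_left (by omega)]
            · intro l hl
              rw [hlast] at hl
              obtain rfl := Option.some.inj hl
              refine ⟨rfl, ?_⟩
              rw [pvCount_append, if_pos rfl, show ((L.count e : Nat) : Int) = 0 by rw [hc0]; rfl]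
              norm_num

theorem pv_sum_mem_prefixes : ∀ (row : List Int) (s : Int), row ≠ [] →
    (s + row.sum) ∈ pvPrefixes s row := by
  intro row
  induction row with
  | nil => intro s h; exact absurd rfl h
  | cons v r ih =>
      intro s _
      by_cases hr : r = []
      · subst hr; simp [pvPrefixes]
      · have := ih (s + v) hr
        simp only [pvPrefixes, List.mem_cons, List.sum_cons]
        right
        rw [show s + (v + r.sum) = s + v + r.sum by ring]
        exact this

theorem pv_not_coll_pairwise (W : Int) (S : List Int) (_hW : 0 ≤ W)
    (hb : ∀ e ∈ S, -(W + 1) ≤ e ∧ e ≤ W) (h : ¬ pvColl W S) :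
    S.Pairwise (fun a b => b = W ∨ (a - b ≠ W + 1 ∧ b - a ≠ W + 1)) := by
  rw [List.pairwise_iff_getElem]
  intro i j hi hj hij
  by_contra hc
  have hbW : S[j] ≠ W := fun h' => hc (Or.inl h')
  have hdiff : S[i] - S[j] = W + 1 ∨ S[j] - S[i] = W + 1 := by
    by_contra h'
    exact hc (Or.inr ⟨fun x => h' (Or.inl x), fun x => h' (Or.inr x)⟩)
  apply h
  have hbi := hb S[i] (List.getElem_mem hi)
  have hbj := hb S[j] (List.getElem_mem hj)
  rcases hdiff with hd | hd
  · -- S[i] - S[j] = W + 1 : S[j] is the negative, its partner S[i] occurs BEFORE it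
    refine ⟨(S[j], j), ?_, by omega, ?_⟩
    · have := List.getElem_zipIdx (l := S) (j := 0) (by simpa using hj)
      simp only [Nat.zero_add] at this
      exact this ▸ List.getElem_mem _
    · apply List.mem_append_left
      have hlt : i < (S.take j).length := by simp; omega
      have : (S.take j)[i] = S[i] := List.getElem_take
      rw [show S[j] + W + 1 = S[i] by omega]
      exact this ▸ List.getElem_mem hlt
  · -- S[j] - S[i] = W + 1 : S[i] is the negative, its partner S[j] ≠ W occurs AFTER it
    refine ⟨(S[i], i), ?_, by omega, ?_⟩
    · have := List.getElem_zipIdx (l := S) (j := 0) (by simpa using hi)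
      simp only [Nat.zero_add] at this
      exact this ▸ List.getElem_mem _
    · apply List.mem_append_right
      rw [List.mem_filter]
      constructor
      · have hlt : j - i < (S.drop i).length := by simp; omega
        have hthis : (S.drop i)[j - i]'hlt = S[i + (j - i)]'(by omega) :=
          List.getElem_drop
        have hje : S[i + (j - i)]'(by omega) = S[j] := by
          congr 1
          omega
        rw [show S[i] + W + 1 = S[j] by omega, ← hje, ← hthis]
        exact List.getElem_mem hlt
      · simp only [decide_eq_true_eq]
        omega

theorem pv_main (bricks : List (List Int)) (hpre : Pre_min_bricks bricks)
    (hnd : ¬ D_min_bricks bricks) :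
    min_bricks bricks = min_bricks_alt bricks := by
  obtain ⟨hne, hb2⟩ := hpre
  obtain ⟨r0, rest, rfl⟩ : ∃ r0 rest, bricks = r0 :: rest := by
    cases bricks with
    | nil => exact absurd rfl hne
    | cons a b => exact ⟨a, b, rfl⟩
  set bricks := r0 :: rest with hb
  simp only [hb, List.headI] at hb2
  have hwl0 : ((PySem.List.pyGet? bricks 0).getD []) = r0 := by
    rw [PySem.List.pyGet?_zero_cons]; rfl
  set wl : Int := r0.sum with hwl
  have hwlnn : 0 ≤ wl := by
    cases hr0 : r0 with
    | nil => simp [hwl, hr0]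
    | cons a t =>
        have hm : (0 : Int) + r0.sum ∈ pvPrefixes 0 r0 := pv_sum_mem_prefixes r0 0 (by simp [hr0])
        have hmem : (0 : Int) + r0.sum ∈ pvSums bricks := by
          rw [pvSums_eq, hb]
          exact List.mem_flatMap.mpr ⟨r0, by simp, hm⟩
        have := hb2 _ hmem
        omega
  have hEb : ∀ e ∈ pvSums bricks, -(wl + 1) ≤ e ∧ e ≤ wl := by
    intro e he
    have := hb2 e he
    constructor <;> omega
  have hP : (pvSums bricks).Pairwise (fun a b => b = wl ∨
      (a - b ≠ wl + 1 ∧ b - a ≠ wl + 1)) := by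
    rw [D_min_bricks] at hnd
    simp only [hb, List.headI] at hnd
    exact pv_not_coll_pairwise wl (pvSums bricks) hwlnn hEb hnd
  have hA := pvMainA wl hwlnn (pvSums bricks) hEb hP
  show (PySem.List.len bricks) - _ = (PySem.List.len bricks) - _
  congr 1
  rw [hwl0]
  rw [pvOuterA wl bricks (List.replicate (wl + 1).toNat (0 : Int), 0)]
  rw [show bricks.flatMap (pvPrefixes 0) = pvSums bricks from (pvSums_eq bricks).symm]
  rw [hA.2.2]
  -- B side: sorted run-length scan over the interior edges
  set F := (pvSums bricks).filter (fun e => decide (e ≠ wl)) with hF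
  set SF := PySem.List.sorted F (fun x => x) false with hSF
  have hpair : SF.Pairwise (· ≤ ·) := by
    have := PySem.List.sorted_pairwise (xs := F) (key := fun x => x)
    simpa [hSF] using this
  have hscan := (pvScan_main SF hpair).1
  have hperm : SF.Perm F := PySem.List.sorted_perm F (fun x => x) false
  rw [hscan, pvMaxCount_perm SF F hperm]
  rfl

-- ===== VERDICT (by name: the statement is the Claim_ definition above) =====
theorem min_bricks_spec : Claim_unchanged_min_bricks := by
  intro bricks _ hpre hnd
  exact pv_main bricks hpre hnd

theorem min_bricks_changed : Claim_changed_min_bricks := by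
  unfold Claim_changed_min_bricks; decide
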